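-- pv_equiv track=rewrite | github.com/eun-woo/logNER | logNER_parsing.py | variable_bit
-- ===== SOURCE A (Python) =====
-- def variable_bit(variable):
--     bit = 0
--     for i in range(len(variable)):
--         if variable[i].isdigit():
--             bit+=3
--         else:
--             bit+=16
--     return bit
-- ===== SOURCE B (Python) =====
-- def variable_bit(variable):
--     d = sum(1 for c in variable if c.isdigit())
--     return 16 * len(variable) - 13 * d
-- ===== Notes on version B (the rewrite author's own statement) =====
-- stated objective: simpler
-- what changed: Replaces the per-character branch-accumulating loop with a digit count plus the closed form 16*n - 13*d.
import Mathlib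
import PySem

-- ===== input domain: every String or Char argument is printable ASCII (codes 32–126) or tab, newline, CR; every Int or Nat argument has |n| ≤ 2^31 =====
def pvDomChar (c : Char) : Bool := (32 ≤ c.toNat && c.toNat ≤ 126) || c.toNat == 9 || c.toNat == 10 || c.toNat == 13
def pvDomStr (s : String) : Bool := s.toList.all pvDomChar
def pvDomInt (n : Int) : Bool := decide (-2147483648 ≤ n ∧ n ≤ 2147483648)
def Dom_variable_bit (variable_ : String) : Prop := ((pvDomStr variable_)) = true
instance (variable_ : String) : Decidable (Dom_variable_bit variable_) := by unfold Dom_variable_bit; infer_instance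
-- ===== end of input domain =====

-- B replaces A's branch-accumulating loop by a digit count and the closed form 16*n - 13*d (simpler).

-- ===== PORT A =====
-- A: bit = 0; for each character, add 3 if it is a digit, else 16.
def variable_bit (variable_ : String) : Int :=
  variable_.toList.foldl (fun bit c => if PySem.Chars.isdigit c then bit + 3 else bit + 16) 0

-- ===== PORT B =====
-- B: d = number of digit characters; return 16*len - 13*d.
def variable_bit_alt (variable_ : String) : Int :=
  let d : Int := ((variable_.toList.filter (fun c => PySem.Chars.isdigit c)).length : Int)
  16 * (variable_.toList.length : Int) - 13 * d

-- ===== PRECONDITION & SPEC =====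
def Spec_variable_bit (variable_ : String) (out : Int) : Prop := out = variable_bit_alt variable_
instance (variable_ : String) (out : Int) : Decidable (Spec_variable_bit variable_ out) := by unfold Spec_variable_bit; infer_instance

-- ===== CLAIM (what is proved, stated in full; the proofs are below) =====
def Claim_equal_variable_bit : Prop := ∀ (variable_ : String), Dom_variable_bit variable_ → Spec_variable_bit variable_ (variable_bit variable_)

-- ===== LEMMAS AND PROOFS =====
theorem variable_bit_fold_closed (l : List Char) (acc : Int) :
    l.foldl (fun bit c => if PySem.Chars.isdigit c then bit + 3 else bit + 16) acc
      = acc + 16 * (l.length : Int) - 13 * ((l.filter (fun c => PySem.Chars.isdigit c)).length : Int) := by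
  induction l generalizing acc with
  | nil => simp
  | cons c t ih =>
    simp only [List.foldl_cons, List.filter_cons, List.length_cons]
    by_cases h : PySem.Chars.isdigit c = true <;> simp [h, ih] <;> ring

-- ===== VERDICT (by name: the statement is the Claim_ definition above) =====
theorem variable_bit_spec : Claim_equal_variable_bit := by
  intro v _
  unfold Spec_variable_bit variable_bit variable_bit_alt
  simp [variable_bit_fold_closed]
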